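-- pv_equiv track=rewrite | github.com/BlenderCN-Org/stalker_garbage | plugins/object/excid/переделанный мой экспорт/io_export_object.py | get_texture_name
-- ===== SOURCE A (Python) =====
-- def get_texture_name(texture_name):
--
-- 	new_texture_name = ''
-- 	b = False
--
-- 	for i in range(len(texture_name)):
-- 		if texture_name[i] == '_' and b == False:
-- 			_name = new_texture_name
-- 			b = True
-- 			new_texture_name += '\\'
-- 			new_texture_name += _name
-- 			new_texture_name += '_'
-- 		elif b == False:
-- 			new_texture_name += str(texture_name[i])
-- 		elif b == True:
-- 			if texture_name[i] == '.':
-- 				break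
-- 			else:
-- 				new_texture_name += str(texture_name[i])
--
-- 	return new_texture_name
-- ===== SOURCE B (Python) =====
-- def get_texture_name(texture_name):
--     prefix, sep, rest = texture_name.partition('_')
--     if not sep:
--         return texture_name
--     return prefix + '\\' + prefix + '_' + rest.partition('.')[0]
-- ===== Notes on version B (the rewrite author's own statement) =====
-- stated objective: idiomatic
-- what changed: Replaced the per-character loop with a boolean state flag and mutable accumulator by two str.partition calls that split at the first underscore and truncate at the first dot.
import Mathlib
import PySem

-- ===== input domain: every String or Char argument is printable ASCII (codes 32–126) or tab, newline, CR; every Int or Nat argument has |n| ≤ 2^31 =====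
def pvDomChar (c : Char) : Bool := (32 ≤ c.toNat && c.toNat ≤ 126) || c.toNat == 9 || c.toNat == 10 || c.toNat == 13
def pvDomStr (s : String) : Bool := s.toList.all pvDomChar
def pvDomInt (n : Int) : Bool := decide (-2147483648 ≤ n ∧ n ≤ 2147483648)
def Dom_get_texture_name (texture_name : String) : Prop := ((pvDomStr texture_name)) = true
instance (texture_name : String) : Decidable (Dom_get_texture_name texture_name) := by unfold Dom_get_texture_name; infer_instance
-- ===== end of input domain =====

-- B replaces A's per-character loop with flag by two partition calls (idiomatic decomposition; same cost).

-- ===== PORT A =====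
-- the loop over range(len(texture_name)) with state (new_texture_name, b), including the break on '.'
def getTexGoA : List Char → List Char → Bool → List Char
  | [], acc, _ => acc
  | c :: cs, acc, b =>
    if c = '_' ∧ b = false then
      -- _name = acc; acc += '\\'; acc += _name; acc += '_'
      getTexGoA cs (acc ++ '\\' :: acc ++ ['_']) true
    else if b = false then
      getTexGoA cs (acc ++ [c]) b
    else if c = '.' then acc        -- break
    else getTexGoA cs (acc ++ [c]) b

def get_texture_name (texture_name : String) : String :=
  String.ofList (getTexGoA texture_name.toList [] false)

-- ===== PORT B =====
-- str.partition with a one-character separator, exact: (takeWhile ≠ sep, sep?, tail after sep)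
def get_texture_name_alt (texture_name : String) : String :=
  let l := texture_name.toList
  let pre := l.takeWhile (· ≠ '_')
  match l.dropWhile (· ≠ '_') with
  | [] => texture_name                         -- sep == '' : no underscore
  | _ :: rest =>
    String.ofList (pre ++ '\\' :: pre ++ '_' :: rest.takeWhile (· ≠ '.'))

-- ===== PRECONDITION & SPEC =====
def Spec_get_texture_name (texture_name : String) (out : String) : Prop := out = get_texture_name_alt texture_name
instance (texture_name : String) (out : String) : Decidable (Spec_get_texture_name texture_name out) := by unfold Spec_get_texture_name; infer_instance

-- ===== CLAIM (what is proved, stated in full; the proofs are below) =====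
def Claim_equal_get_texture_name : Prop := ∀ (texture_name : String), Dom_get_texture_name texture_name → Spec_get_texture_name texture_name (get_texture_name texture_name)

-- ===== LEMMAS AND PROOFS =====

theorem getTexGoA_true (l : List Char) : ∀ acc, getTexGoA l acc true = acc ++ l.takeWhile (· ≠ '.') := by
  induction l with
  | nil => intro acc; simp [getTexGoA]
  | cons c cs ih =>
    intro acc
    by_cases h : c = '.'
    · subst h; simp [getTexGoA]
    · simp [getTexGoA, h, ih]

theorem getTexGoA_false (l : List Char) : ∀ acc, getTexGoA l acc false =
    match l.dropWhile (· ≠ '_') with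
    | [] => acc ++ l
    | _ :: rest =>
      (acc ++ l.takeWhile (· ≠ '_')) ++ '\\' :: (acc ++ l.takeWhile (· ≠ '_')) ++ '_' :: rest.takeWhile (· ≠ '.') := by
  induction l with
  | nil => intro acc; simp [getTexGoA]
  | cons c cs ih =>
    intro acc
    by_cases h : c = '_'
    · subst h
      simp [getTexGoA, getTexGoA_true]
    · simp only [getTexGoA, h, false_and, if_false, ih (acc ++ [c]),
        List.dropWhile_cons, List.takeWhile_cons, if_pos (by simp [h] : (decide (c ≠ '_')) = true)]
      cases cs.dropWhile (· ≠ '_') <;> simp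

-- ===== VERDICT (by name: the statement is the Claim_ definition above) =====
theorem get_texture_name_spec : Claim_equal_get_texture_name := by
  intro s _
  unfold Spec_get_texture_name get_texture_name get_texture_name_alt
  rw [getTexGoA_false]
  simp only [ne_eq]
  cases h : s.toList.dropWhile (fun x => !decide (x = '_')) <;> simp [h, String.ofList]
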